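-- pv_equiv track=rewrite | github.com/convince-project/AS2FM | scxml_converter/src/scxml_converter/scxml_entries/utils.py | replace_ros_interface_expression
-- ===== SOURCE A (Python) =====
-- def replace_ros_interface_expression(msg_expr: str) -> str:
--     """
--     Convert a ROS interface expression (msg, req, res, goal, feedback, result) to plain SCXML
--     (event).
--     """
--     scxml_prefix = "_event."
--     # TODO: Use regex and ensure no other valid character exists before the initial underscore
--     for ros_prefix in [
--             "_msg.",  # topics
--             "_req.",  # services
--             "_res.",  # services
--             "_goal.",  # actions
--             "_feedback.",  # actions
--             "_result."  # actions
--     ]: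
--         msg_expr = msg_expr.replace(ros_prefix, scxml_prefix)
--     return msg_expr
-- ===== SOURCE B (Python) =====
-- def replace_ros_interface_expression(msg_expr: str) -> str:
--     """
--     Convert a ROS interface expression (msg, req, res, goal, feedback, result) to plain SCXML
--     (event).
--     """
--     prefixes = ("_msg.", "_req.", "_res.", "_goal.", "_feedback.", "_result.")
--     out = []
--     i = 0
--     n = len(msg_expr)
--     while i < n:
--         for p in prefixes:
--             if msg_expr.startswith(p, i):
--                 out.append("_event.")
--                 i += len(p)
--                 break
--         else:
--             out.append(msg_expr[i])
--             i += 1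
--     return "".join(out)
-- ===== Notes on version B (the rewrite author's own statement) =====
-- stated objective: alternative
-- what changed: A makes six sequential full-string str.replace passes (one per ROS prefix); B scans the string once left-to-right, substituting the SCXML event prefix wherever any of the six ROS prefixes matches, in a single pass.
import Mathlib
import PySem

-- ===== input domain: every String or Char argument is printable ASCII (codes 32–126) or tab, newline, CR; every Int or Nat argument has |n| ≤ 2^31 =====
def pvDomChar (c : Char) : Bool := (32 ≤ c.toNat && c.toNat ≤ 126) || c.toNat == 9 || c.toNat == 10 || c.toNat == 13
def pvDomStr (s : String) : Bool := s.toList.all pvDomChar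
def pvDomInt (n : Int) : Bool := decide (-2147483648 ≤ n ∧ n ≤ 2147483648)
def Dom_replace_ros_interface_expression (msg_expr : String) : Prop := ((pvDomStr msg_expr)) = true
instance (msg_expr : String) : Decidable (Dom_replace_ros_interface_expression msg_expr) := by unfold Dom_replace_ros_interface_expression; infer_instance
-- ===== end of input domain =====

-- B replaces A's six sequential full-string str.replace passes by ONE left-to-right scan
-- that substitutes the SCXML event prefix at the first matching ROS prefix; objective: alternative.

-- ===== PORT A =====
-- A: for ros_prefix in [...]: msg_expr = msg_expr.replace(ros_prefix, "_event.")
def replace_ros_interface_expression (msg_expr : String) : String :=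
  ["_msg.", "_req.", "_res.", "_goal.", "_feedback.", "_result."].foldl
    (fun e p => PySem.Str.replace e p "_event.") msg_expr

-- ===== PORT B =====
-- the six ROS prefixes, as char lists (Source B's `prefixes` tuple)
def pvPrefixes : List (List Char) :=
  ["_msg.".toList, "_req.".toList, "_res.".toList, "_goal.".toList,
   "_feedback.".toList, "_result.".toList]

-- Source B's while-loop: at each position, find the first prefix that matches (the inner
-- for/break loop); emit "_event." and skip it, else copy one char.
-- `p.length.max 1` is only a termination guard: no prefix in pvPrefixes is empty,
-- so it always equals p.length (Python's `i += len(p)`).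
def pvScan (ps : List (List Char)) : List Char → List Char
  | [] => []
  | c :: t =>
    match ps.find? (fun p => PySem.Chars.startswith (c :: t) p) with
    | some p => "_event.".toList ++ pvScan ps ((c :: t).drop (p.length.max 1))
    | none => c :: pvScan ps t
  termination_by l => l.length
  decreasing_by
  all_goals simp [List.length_drop]

def replace_ros_interface_expression_alt (msg_expr : String) : String :=
  String.ofList (pvScan pvPrefixes msg_expr.toList)

-- ===== PRECONDITION & SPEC =====
def Spec_replace_ros_interface_expression (msg_expr : String) (out : String) : Prop := out = replace_ros_interface_expression_alt msg_expr
instance (msg_expr : String) (out : String) : Decidable (Spec_replace_ros_interface_expression msg_expr out) := by unfold Spec_replace_ros_interface_expression; infer_instance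

-- ===== CLAIM (what is proved, stated in full; the proofs are below) =====
def Claim_equal_replace_ros_interface_expression : Prop := ∀ (msg_expr : String), Dom_replace_ros_interface_expression msg_expr → Spec_replace_ros_interface_expression msg_expr (replace_ros_interface_expression msg_expr)

-- ===== LEMMAS AND PROOFS =====

-- one-pattern left-to-right replacement; equals Chars.replace for a nonempty pattern
def pvRep1 (p : List Char) : List Char → List Char
  | [] => []
  | c :: t =>
    if p.isPrefixOf (c :: t) then "_event.".toList ++ pvRep1 p ((c :: t).drop (p.length.max 1))
    else c :: pvRep1 p t
  termination_by l => l.length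
  decreasing_by
  all_goals simp [List.length_drop]

lemma pvNewChars : "_event.".toList = ['_', 'e', 'v', 'e', 'n', 't', '.'] := rfl

lemma pvGo_eq (p : List Char) (hp : p ≠ []) :
    ∀ (fuel : Nat) (l acc : List Char), l.length ≤ fuel →
      PySem.Chars.replace.go p "_event.".toList fuel l acc = acc.reverse ++ pvRep1 p l := by
  have hp2 : 1 ≤ p.length := List.length_pos_of_ne_nil hp
  have hp1 : p.length.max 1 = p.length := Nat.max_eq_left hp2
  intro fuel
  induction fuel with
  | zero =>
    intro l acc hl
    have : l = [] := List.eq_nil_of_length_eq_zero (Nat.le_zero.mp hl)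
    subst this
    simp [PySem.Chars.replace.go, pvRep1]
  | succ n ih =>
    intro l acc hl
    cases l with
    | nil => simp [PySem.Chars.replace.go, pvRep1]
    | cons c t =>
      by_cases h : p.isPrefixOf (c :: t)
      · rw [PySem.Chars.replace.go]
        simp only [h, if_true]
        rw [ih ((c :: t).drop p.length) ("_event.".toList.reverse ++ acc)
            (by simp only [List.length_drop, List.length_cons] at hl ⊢; omega)]
        rw [pvRep1]
        simp [h, hp1]
      · rw [PySem.Chars.replace.go]
        simp only [h, if_false]
        rw [ih t (c :: acc) (by simp only [List.length_cons] at hl; omega)]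
        rw [pvRep1]
        simp [h]

lemma pvReplace_eq_rep1 (p : List Char) (hp : p ≠ []) (s : List Char) :
    PySem.Chars.replace s p "_event.".toList = pvRep1 p s := by
  rw [PySem.Chars.replace]
  simp [List.isEmpty_iff, hp]
  exact pvGo_eq p hp s.length s [] (le_refl _)

lemma pvScan_empty (ps : List (List Char)) : pvScan ps [] = [] := by rw [pvScan]

-- pvScan with no patterns is the identity
lemma pvScan_nil : ∀ (s : List Char), pvScan [] s = s := by
  intro s
  induction s with
  | nil => rw [pvScan]
  | cons c t ih => rw [pvScan]; simp [ih]

-- a prefix of the scanned output containing no underscore is a prefix of the input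
lemma pvScan_prefix_no_underscore (ps : List (List Char)) :
    ∀ (t u : List Char), '_' ∉ u → u <+: pvScan ps t → u <+: t := by
  intro t
  induction t with
  | nil =>
    intro u hu hpre
    rwa [pvScan_empty] at hpre
  | cons c t ih =>
    intro u hu hpre
    rw [pvScan] at hpre
    cases hfind : ps.find? (fun p => PySem.Chars.startswith (c :: t) p) with
    | some p =>
      rw [hfind] at hpre
      cases u with
      | nil => exact List.nil_prefix
      | cons a u' =>
        rw [pvNewChars] at hpre
        simp only [List.cons_append, List.cons_prefix_cons] at hpre
        simp at hu
        exact absurd hpre.1.symm hu.1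
    | none =>
      rw [hfind] at hpre
      cases u with
      | nil => exact List.nil_prefix
      | cons a u' =>
        rw [List.cons_prefix_cons] at hpre ⊢
        simp at hu
        exact ⟨hpre.1, ih u' hu.2 hpre.2⟩

-- no pattern (all starting with '_') matches at a non-underscore character
lemma pvFind_none (ps : List (List Char)) (hps : ∀ p ∈ ps, p.head? = some '_')
    (a : Char) (ha : a ≠ '_') (xs : List Char) :
    ps.find? (fun p => PySem.Chars.startswith (a :: xs) p) = none := by
  rw [List.find?_eq_none]
  intro p hp
  have hh := hps p hp
  cases p with
  | nil => simp at hh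
  | cons b pt =>
    simp at hh
    subst hh
    simp only [PySem.Chars.startswith, Bool.not_eq_true, ← Bool.not_eq_true,
      List.isPrefixOf_iff_prefix]
    rw [List.cons_prefix_cons]
    intro h
    exact absurd h.1.symm ha

-- scanning passes over an underscore-free block unchanged
lemma pvScan_append_free (ps : List (List Char)) (hps : ∀ p ∈ ps, p.head? = some '_') :
    ∀ (u s : List Char), '_' ∉ u → pvScan ps (u ++ s) = u ++ pvScan ps s := by
  intro u
  induction u with
  | nil => intro s _; simp
  | cons a u' ih =>
    intro s hu
    simp at hu
    rw [List.cons_append, pvScan, pvFind_none ps hps a (fun h => hu.1 h.symm) _]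
    simp [ih s hu.2]

-- pvRep1 copies a non-underscore head
lemma pvRep1_cons_ne (q : List Char) (hq : q.head? = some '_') (a : Char) (ha : a ≠ '_')
    (y : List Char) : pvRep1 q (a :: y) = a :: pvRep1 q y := by
  rw [pvRep1]
  have : ¬ q.isPrefixOf (a :: y) = true := by
    cases q with
    | nil => simp at hq
    | cons b qt =>
      simp at hq; subst hq
      rw [List.isPrefixOf_iff_prefix, List.cons_prefix_cons]
      intro h
      exact absurd h.1.symm ha
  simp [this]

-- pvRep1 passes over an inserted "_event." untouched
lemma pvRep1_event (q : List Char) (hq : q.head? = some '_')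
    (hqe : ∀ x : List Char, q.isPrefixOf ("_event.".toList ++ x) = false) (x : List Char) :
    pvRep1 q ("_event.".toList ++ x) = "_event.".toList ++ pvRep1 q x := by
  have h0 := hqe x
  rw [pvNewChars] at h0 ⊢
  simp only [List.cons_append, List.nil_append] at h0 ⊢
  rw [pvRep1]
  simp only [h0, if_false, Bool.false_eq_true]
  rw [pvRep1_cons_ne q hq 'e' (by decide), pvRep1_cons_ne q hq 'v' (by decide),
      pvRep1_cons_ne q hq 'e' (by decide), pvRep1_cons_ne q hq 'n' (by decide),
      pvRep1_cons_ne q hq 't' (by decide), pvRep1_cons_ne q hq '.' (by decide)]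

-- MAIN: a further sequential replace pass equals adding the pattern to the single scan
lemma pvMain (ps : List (List Char)) (q : List Char)
    (hps : ∀ p ∈ ps, p.head? = some '_')
    (hq : q.head? = some '_') (hqt : '_' ∉ q.tail)
    (hqe : ∀ x : List Char, q.isPrefixOf ("_event.".toList ++ x) = false) :
    ∀ (s : List Char), pvRep1 q (pvScan ps s) = pvScan (ps ++ [q]) s := by
  obtain ⟨b, qt, rfl⟩ : ∃ b qt, q = b :: qt := by
    cases q with
    | nil => simp at hq
    | cons b qt => exact ⟨b, qt, rfl⟩
  have hb : b = '_' := by simpa using hq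
  subst hb
  simp only [List.tail_cons] at hqt
  have key : ∀ (n : Nat) (s : List Char), s.length ≤ n →
      pvRep1 ('_' :: qt) (pvScan ps s) = pvScan (ps ++ ['_' :: qt]) s := by
    intro n
    induction n with
    | zero =>
      intro s hs
      have : s = [] := List.eq_nil_of_length_eq_zero (Nat.le_zero.mp hs)
      subst this
      rw [pvScan_empty, pvScan_empty, pvRep1]
    | succ n ih =>
      intro s hs
      cases s with
      | nil => rw [pvScan_empty, pvScan_empty, pvRep1]
      | cons c t =>
        cases hfind : ps.find? (fun p => PySem.Chars.startswith (c :: t) p) with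
        | some p =>
          have hfind2 :
              (ps ++ ['_' :: qt]).find? (fun p => PySem.Chars.startswith (c :: t) p) = some p := by
            rw [List.find?_append, hfind]; rfl
          rw [pvScan, hfind, pvScan, hfind2]
          rw [pvRep1_event ('_' :: qt) hq hqe]
          congr 1
          refine ih _ ?_
          have h1 : 1 ≤ p.length.max 1 := Nat.le_max_right _ 1
          simp only [List.length_drop, List.length_cons] at hs ⊢
          omega
        | none =>
          by_cases hqpre : ('_' :: qt) <+: (c :: t)
          · -- the new pattern q matches at the head
            rw [List.cons_prefix_cons] at hqpre
            obtain ⟨hc, hqt2⟩ := hqpre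
            obtain ⟨s', rfl⟩ := hqt2
            subst hc
            have hstep : pvScan ps ('_' :: (qt ++ s')) = '_' :: (qt ++ pvScan ps s') := by
              rw [pvScan, hfind, pvScan_append_free ps hps qt s' hqt]
            rw [hstep, pvRep1]
            have hpre2 : ('_' :: qt).isPrefixOf ('_' :: (qt ++ pvScan ps s')) = true := by
              rw [List.isPrefixOf_iff_prefix]
              exact List.cons_prefix_cons.mpr ⟨rfl, List.prefix_append _ _⟩
            simp only [hpre2, if_true]
            have hdrop : ('_' :: (qt ++ pvScan ps s')).drop (('_' :: qt).length.max 1)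
                = pvScan ps s' := by
              have hm : ('_' :: qt).length.max 1 = qt.length + 1 := by
                rw [List.length_cons]
                exact Nat.max_eq_left (Nat.succ_le_succ (Nat.zero_le _))
              rw [hm, List.drop_succ_cons, List.drop_left]
            rw [hdrop]
            have hfind2 :
                (ps ++ ['_' :: qt]).find?
                  (fun p => PySem.Chars.startswith ('_' :: (qt ++ s')) p) = some ('_' :: qt) := by
              rw [List.find?_append, hfind]
              simp only [Option.none_or, List.find?_singleton]
              have hsw : PySem.Chars.startswith ('_' :: (qt ++ s')) ('_' :: qt) = true := by
                simp only [PySem.Chars.startswith, List.isPrefixOf_iff_prefix]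
                exact List.cons_prefix_cons.mpr ⟨rfl, List.prefix_append _ _⟩
              rw [hsw]
              rfl
            rw [pvScan, hfind2]
            show "_event.".toList ++ pvRep1 ('_' :: qt) (pvScan ps s') =
              "_event.".toList ++
                pvScan (ps ++ ['_' :: qt])
                  (List.drop (('_' :: qt).length.max 1) ('_' :: (qt ++ s')))
            have hdrop2 : ('_' :: (qt ++ s')).drop (('_' :: qt).length.max 1) = s' := by
              have hm : ('_' :: qt).length.max 1 = qt.length + 1 := by
                rw [List.length_cons]
                exact Nat.max_eq_left (Nat.succ_le_succ (Nat.zero_le _))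
              rw [hm, List.drop_succ_cons, List.drop_left]
            rw [hdrop2]
            congr 1
            refine ih s' ?_
            simp only [List.length_cons, List.length_append] at hs
            omega
          · -- nothing matches at the head
            have hfind2 :
                (ps ++ ['_' :: qt]).find? (fun p => PySem.Chars.startswith (c :: t) p) = none := by
              rw [List.find?_append, hfind]
              simp only [Option.none_or, List.find?_singleton]
              have : PySem.Chars.startswith (c :: t) ('_' :: qt) = false := by
                simp only [PySem.Chars.startswith, ← Bool.not_eq_true,
                  List.isPrefixOf_iff_prefix]
                exact fun h => hqpre h
              rw [this]
              rfl
            rw [pvScan, hfind, pvScan, hfind2]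
            have hnop : ¬ ('_' :: qt).isPrefixOf (c :: pvScan ps t) = true := by
              rw [List.isPrefixOf_iff_prefix, List.cons_prefix_cons]
              rintro ⟨hc, hpre'⟩
              have := pvScan_prefix_no_underscore ps t qt hqt hpre'
              exact hqpre (List.cons_prefix_cons.mpr ⟨hc, this⟩)
            rw [pvRep1, if_neg hnop]
            congr 1
            refine ih t ?_
            simp only [List.length_cons] at hs
            omega
  intro s
  exact key s.length s (le_refl _)

-- q.isPrefixOf ("_event." ++ x) is false whenever q's second char is not 'e'
lemma pvNotPrefixEvent (b : Char) (r : List Char) (hb : b ≠ 'e') (x : List Char) :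
    List.isPrefixOf ('_' :: b :: r) ("_event.".toList ++ x) = false := by
  rw [pvNewChars]
  simp only [List.cons_append, ← Bool.not_eq_true, List.isPrefixOf_iff_prefix,
    List.cons_prefix_cons]
  rintro ⟨-, hbe, -⟩
  exact hb hbe

-- the six sequential passes, chained into the single scan
lemma pvChain (L : List Char) :
    pvRep1 "_result.".toList (pvRep1 "_feedback.".toList (pvRep1 "_goal.".toList
      (pvRep1 "_res.".toList (pvRep1 "_req.".toList (pvRep1 "_msg.".toList L))))) =
    pvScan pvPrefixes L := by
  have h1 : pvRep1 "_msg.".toList L = pvScan ["_msg.".toList] L := by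
    have := pvMain [] "_msg.".toList (by decide) (by decide) (by decide)
      (fun x => pvNotPrefixEvent 'm' "sg.".toList (by decide) x) L
    rwa [pvScan_nil] at this
  have h2 := pvMain ["_msg.".toList] "_req.".toList (by decide) (by decide) (by decide)
      (fun x => pvNotPrefixEvent 'r' "eq.".toList (by decide) x)
  have h3 := pvMain ["_msg.".toList, "_req.".toList] "_res.".toList (by decide) (by decide)
      (by decide) (fun x => pvNotPrefixEvent 'r' "es.".toList (by decide) x)
  have h4 := pvMain ["_msg.".toList, "_req.".toList, "_res.".toList] "_goal.".toList
      (by decide) (by decide) (by decide)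
      (fun x => pvNotPrefixEvent 'g' "oal.".toList (by decide) x)
  have h5 := pvMain ["_msg.".toList, "_req.".toList, "_res.".toList, "_goal.".toList]
      "_feedback.".toList (by decide) (by decide) (by decide)
      (fun x => pvNotPrefixEvent 'f' "eedback.".toList (by decide) x)
  have h6 := pvMain ["_msg.".toList, "_req.".toList, "_res.".toList, "_goal.".toList,
      "_feedback.".toList] "_result.".toList (by decide) (by decide) (by decide)
      (fun x => pvNotPrefixEvent 'r' "esult.".toList (by decide) x)
  simp only [List.cons_append, List.nil_append] at h2 h3 h4 h5 h6
  rw [h1, h2, h3, h4, h5, h6]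
  rfl

-- ===== VERDICT (by name: the statement is the Claim_ definition above) =====
theorem replace_ros_interface_expression_spec : Claim_equal_replace_ros_interface_expression := by
  intro msg_expr _
  unfold Spec_replace_ros_interface_expression
  unfold replace_ros_interface_expression replace_ros_interface_expression_alt
  simp only [List.foldl, PySem.Str.replace, PySem.Str.toList_replace, String.toList_ofList]
  congr 1
  rw [pvReplace_eq_rep1 _ (by decide), pvReplace_eq_rep1 _ (by decide),
      pvReplace_eq_rep1 _ (by decide), pvReplace_eq_rep1 _ (by decide),
      pvReplace_eq_rep1 _ (by decide), pvReplace_eq_rep1 _ (by decide)]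
  exact pvChain msg_expr.toList
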